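-- pv_equiv track=rewrite | github.com/RandyLimmy/Algoverse-Research-S25 | rag_scispacy_umls.py | compute_overlap_score
-- ===== SOURCE A (Python) =====
-- from typing import List, Dict, Tuple, Optional, Set
--
-- def compute_overlap_score(terms: List[str], title: str, abstract: str) -> Tuple[int, List[str]]:
--     """Count how many extracted terms appear in title+abstract (case-insensitive).
--
--     Returns (overlap_count, matched_terms).
--     """
--     doc_text = f"{title}\n{abstract}".lower()
--     matched: List[str] = []
--     count = 0
--     for term in terms:
--         if not term:
--             continue
--         t = term.lower()
--         # simple substring match; could be improved with token-boundary checks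
--         if t in doc_text:
--             matched.append(term)
--             count += 1
--     return count, matched
-- ===== SOURCE B (Python) =====
-- def compute_overlap_score(terms, title, abstract):
--     """Two-phase: build the set of distinct (lowercased, nonempty) terms that occur
--     in the document once, then one filter pass over terms in order."""
--     doc_text = f"{title}\n{abstract}".lower()
--     hits = {t for t in (term.lower() for term in terms if term) if t in doc_text}
--     matched = [term for term in terms if term and term.lower() in hits]
--     return len(matched), matched
-- ===== Notes on version B (the rewrite author's own statement) =====
-- stated objective: alternative
-- what changed: Replaces A's single accumulator loop (count/matched maintained together, substring test per occurrence) by a two-phase set approach: a set of distinct lowercased terms occurring in the document is built once, then matched is a filter over terms against that set and the count is its length; duplicate terms are substring-tested only once.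
import Mathlib
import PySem

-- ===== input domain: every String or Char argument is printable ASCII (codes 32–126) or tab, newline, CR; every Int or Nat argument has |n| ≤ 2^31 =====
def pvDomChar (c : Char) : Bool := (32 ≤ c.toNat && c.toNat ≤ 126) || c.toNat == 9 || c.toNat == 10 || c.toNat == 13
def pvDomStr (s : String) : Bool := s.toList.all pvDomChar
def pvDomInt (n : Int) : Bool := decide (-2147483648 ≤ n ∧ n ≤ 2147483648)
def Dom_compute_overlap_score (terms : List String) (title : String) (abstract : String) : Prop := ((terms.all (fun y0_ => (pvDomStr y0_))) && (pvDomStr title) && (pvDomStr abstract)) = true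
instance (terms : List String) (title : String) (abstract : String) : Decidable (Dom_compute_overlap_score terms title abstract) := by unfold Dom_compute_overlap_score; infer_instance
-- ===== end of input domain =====

-- B replaces A's single accumulator loop by a two-phase set approach (set of distinct
-- lowercased terms occurring in the document, then one filter pass); objective: alternative.

-- ===== PORT A =====
def compute_overlap_score (terms : List String) (title : String) (abstract : String) : Int × List String :=
  let doc_text := PySem.Str.lower (title ++ "\n" ++ abstract)
  let r := terms.foldl (fun (st : Int × List String) term =>
    if term = "" then st
    else if PySem.Str.isIn (PySem.Str.lower term) doc_text then (st.1 + 1, st.2 ++ [term]) else st) (0, [])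
  (r.1, r.2)

-- ===== PORT B =====
def compute_overlap_score_alt (terms : List String) (title : String) (abstract : String) : Int × List String :=
  let doc_text := PySem.Str.lower (title ++ "\n" ++ abstract)
  let hits := PySem.Set.ofList
    (((terms.filter (fun term => !(term == ""))).map PySem.Str.lower).filter
      (fun t => PySem.Str.isIn t doc_text))
  let matched := terms.filter (fun term => !(term == "") && PySem.Set.contains hits (PySem.Str.lower term))
  ((matched.length : Int), matched)

-- ===== PRECONDITION & SPEC =====
def Spec_compute_overlap_score (terms : List String) (title : String) (abstract : String) (out : Int × List String) : Prop := out = compute_overlap_score_alt terms title abstract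
instance (terms : List String) (title : String) (abstract : String) (out : Int × List String) : Decidable (Spec_compute_overlap_score terms title abstract out) := by unfold Spec_compute_overlap_score; infer_instance

-- ===== CLAIM (what is proved, stated in full; the proofs are below) =====
def Claim_equal_compute_overlap_score : Prop := ∀ (terms : List String) (title : String) (abstract : String), Dom_compute_overlap_score terms title abstract → Spec_compute_overlap_score terms title abstract (compute_overlap_score terms title abstract)

-- ===== LEMMAS AND PROOFS =====

-- membership in B's hit set, for a nonempty term of the list, is exactly the substring test
theorem pv_contains_hits (terms : List String) (doc : String) (term : String)
    (hmem : term ∈ terms) (hne : term ≠ "") :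
    PySem.Set.contains
      (PySem.Set.ofList
        (((terms.filter (fun term => !(term == ""))).map PySem.Str.lower).filter
          (fun t => PySem.Str.isIn t doc)))
      (PySem.Str.lower term)
      = PySem.Str.isIn (PySem.Str.lower term) doc := by
  by_cases h : PySem.Str.isIn (PySem.Str.lower term) doc = true
  · rw [h]
    rw [PySem.Set.contains_iff, PySem.Set.mem_ofList]
    refine List.mem_filter.mpr ⟨List.mem_map.mpr ⟨term, List.mem_filter.mpr ⟨hmem, by simp [hne]⟩, rfl⟩, h⟩
  · rw [Bool.eq_false_iff.mpr h]
    rw [Bool.eq_false_iff]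
    intro hc
    have := (PySem.Set.contains_iff _ _).mp hc
    have := (List.mem_filter.mp ((PySem.Set.mem_ofList _ _).mp this)).2
    exact h this

-- A's fold accumulates the filter of the remaining list onto the current state
theorem pv_foldA (doc : String) (l : List String) (c : Int) (m : List String) :
    l.foldl (fun (st : Int × List String) term =>
      if term = "" then st
      else if PySem.Str.isIn (PySem.Str.lower term) doc then (st.1 + 1, st.2 ++ [term]) else st) (c, m)
    = (c + ((l.filter (fun term => !(term == "") && PySem.Str.isIn (PySem.Str.lower term) doc)).length : Int),
       m ++ l.filter (fun term => !(term == "") && PySem.Str.isIn (PySem.Str.lower term) doc)) := by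
  induction l generalizing c m with
  | nil => simp
  | cons a l ih =>
    simp only [List.foldl_cons, List.filter_cons]
    by_cases ha : a = ""
    · rw [if_pos ha]
      have hP : (!(a == "") && PySem.Str.isIn (PySem.Str.lower a) doc) = false := by
        simp [ha]
      rw [hP, if_neg Bool.false_ne_true]
      exact ih c m
    · rw [if_neg ha]
      by_cases hin : PySem.Str.isIn (PySem.Str.lower a) doc = true
      · have hP : (!(a == "") && PySem.Str.isIn (PySem.Str.lower a) doc) = true := by
          rw [hin, Bool.and_true]; simp [ha]
        rw [if_pos hin, hP, if_pos rfl, ih]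
        rw [Prod.mk.injEq]
        constructor
        · rw [List.length_cons]
          push_cast
          omega
        · rw [List.append_assoc, List.singleton_append]
      · have hP : (!(a == "") && PySem.Str.isIn (PySem.Str.lower a) doc) = false := by
          rw [Bool.eq_false_iff.mpr hin, Bool.and_false]
        rw [if_neg hin, hP, if_neg Bool.false_ne_true]
        exact ih c m

-- ===== VERDICT (by name: the statement is the Claim_ definition above) =====
theorem compute_overlap_score_spec : Claim_equal_compute_overlap_score := by
  intro terms title abstract _
  unfold Spec_compute_overlap_score compute_overlap_score compute_overlap_score_alt
  dsimp only
  set doc := PySem.Str.lower (title ++ "\n" ++ abstract) with hdoc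
  have hfilter :
      terms.filter (fun term => !(term == "") &&
        PySem.Set.contains
          (PySem.Set.ofList
            (((terms.filter (fun term => !(term == ""))).map PySem.Str.lower).filter
              (fun t => PySem.Str.isIn t doc)))
          (PySem.Str.lower term))
      = terms.filter (fun term => !(term == "") && PySem.Str.isIn (PySem.Str.lower term) doc) := by
    apply List.filter_congr
    intro term hmem
    by_cases hne : term = ""
    · simp [hne]
    · rw [pv_contains_hits terms doc term hmem hne]
  rw [hfilter, pv_foldA doc terms 0 []]
  simp
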